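-- pv_equiv track=rewrite | github.com/juhapekka/tira25 | formula.py | count_sequences_slow
-- ===== SOURCE A (Python) =====
-- def count_sequences_slow(n):
--     result = {}
--     result[(0, 0)] = 1
--     for i in range(1, n + 1):
--         result[(0, i)] = 0
--     for i in range(1, n + 1):
--         for j in range(0, n + 1):
--             result[(i, j)] = 0
--             if j + 1 <= n:
--                 result[(i, j)] += result[(i - 1, j + 1)]
--             if j - 1 >= 0:
--                 result[(i, j)] += result[(i - 1, j - 1)]
--     return result[(n, 0)]
-- ===== SOURCE B (Python) =====
-- def count_sequences_slow(n):
--     if n % 2 == 1: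
--         return 0
--     h = n // 2
--     c = 1
--     for k in range(h):
--         c = c * (n - k) // (k + 1)
--     d = c * (n - h) // (h + 1)
--     return c - d
-- ===== Notes on version B (the rewrite author's own statement) =====
-- stated objective: faster
-- what changed: Replaced the O(n^2) dynamic-programming table over all (step,height) pairs by the Catalan closed form C(n,n/2)-C(n,n/2+1) (0 for odd n), computing the binomial coefficients with a single O(n/2) multiplicative loop.
-- outside the precondition, e.g. on count_sequences_slow(-1): A raises KeyError, B returns 0
import Mathlib
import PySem

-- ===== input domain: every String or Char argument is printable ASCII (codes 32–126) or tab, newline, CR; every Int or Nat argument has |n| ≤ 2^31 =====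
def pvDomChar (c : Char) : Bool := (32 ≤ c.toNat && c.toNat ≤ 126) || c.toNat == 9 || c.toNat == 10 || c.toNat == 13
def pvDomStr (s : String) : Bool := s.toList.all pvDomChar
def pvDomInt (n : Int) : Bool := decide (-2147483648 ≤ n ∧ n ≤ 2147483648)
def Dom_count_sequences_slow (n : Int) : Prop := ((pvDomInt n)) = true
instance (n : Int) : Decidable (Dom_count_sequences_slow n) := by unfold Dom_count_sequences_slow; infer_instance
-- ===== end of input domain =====

-- B replaces A's O(n^2) DP table by the closed form C(n,n/2)-C(n,n/2+1) (0 for odd n), computed with one multiplicative loop (objective: faster).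

-- ===== PORT A =====
-- Python's dict is a hash map; the table is ported with Std.HashMap (insert/getD) — exact here:
-- A only ever point-writes result[(i,j)] and point-reads existing keys, never iterates the dict.
-- the body of A's inner loop: result[(i,j)] = 0, then two conditional += reads of row i-1
def stepA (n i : Int) (r : Std.HashMap (Int × Int) Int) (j : Int) : Std.HashMap (Int × Int) Int :=
  let r1 := r.insert (i, j) 0
  let r2 := if j + 1 ≤ n then r1.insert (i, j) (r1.getD (i, j) 0 + r1.getD (i - 1, j + 1) 0) else r1
  if j - 1 ≥ 0 then r2.insert (i, j) (r2.getD (i, j) 0 + r2.getD (i - 1, j - 1) 0) else r2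

def count_sequences_slow (n : Int) : Int :=
  let r0 : Std.HashMap (Int × Int) Int := (∅ : Std.HashMap (Int × Int) Int).insert (0, 0) 1
  let r1 := (PySem.List.pyRange 1 (n + 1) 1).foldl (fun r i => r.insert (0, i) 0) r0
  let r2 := (PySem.List.pyRange 1 (n + 1) 1).foldl
      (fun r i => (PySem.List.pyRange 0 (n + 1) 1).foldl (stepA n i) r) r1
  r2.getD (n, 0) 0

-- ===== PORT B =====
def count_sequences_slow_alt (n : Int) : Int :=
  if PySem.Int.mod n 2 = 1 then 0
  else
    let h := PySem.Int.floordiv n 2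
    let c := (PySem.List.pyRange 0 h 1).foldl (fun c k => PySem.Int.floordiv (c * (n - k)) (k + 1)) 1
    let d := PySem.Int.floordiv (c * (n - h)) (h + 1)
    c - d

-- ===== PRECONDITION & SPEC =====
-- Pre_ excludes exactly n < 0, where A raises KeyError (result[(n,0)] was never written).
def Pre_count_sequences_slow (n : Int) : Prop := 0 ≤ n
instance (n : Int) : Decidable (Pre_count_sequences_slow n) := by unfold Pre_count_sequences_slow; infer_instance
def pvWitness_count_sequences_slow : Int := 4

def Spec_count_sequences_slow (n : Int) (out : Int) : Prop := out = count_sequences_slow_alt n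
instance (n : Int) (out : Int) : Decidable (Spec_count_sequences_slow n out) := by unfold Spec_count_sequences_slow; infer_instance

-- ===== CLAIM (what is proved, stated in full; the proofs are below) =====
def Claim_equal_count_sequences_slow : Prop := ∀ (n : Int), Dom_count_sequences_slow n → Pre_count_sequences_slow n → Spec_count_sequences_slow n (count_sequences_slow n)

-- ===== LEMMAS AND PROOFS =====

-- A's recurrence as a pure function: fA n i j = value of result[(i,j)] in A's table of width n
def fA (n : Nat) : Nat → Nat → Int
  | 0, j => if j = 0 then 1 else 0
  | i + 1, j => (if j + 1 ≤ n then fA n i (j + 1) else 0) + (if 1 ≤ j then fA n i (j - 1) else 0)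

-- the ballot closed form: C(i,(i+j)/2) - C(i,(i+j)/2+1) when i+j is even, else 0
def bb (i j : Nat) : Int :=
  if (i + j) % 2 = 0 then (i.choose ((i + j) / 2) : Int) - (i.choose ((i + j) / 2 + 1) : Int) else 0

-- bridge: Std.HashMap.getD_insert with the key test as a Prop on the queried key
lemma hm_getD_insert (m : Std.HashMap (Int × Int) Int) (k a : Int × Int) (v d : Int) :
    (m.insert k v).getD a d = if a = k then v else m.getD a d := by
  rw [Std.HashMap.getD_insert]
  by_cases h : a = k
  · simp [h]
  · simp [h, Ne.symm h]

lemma bb_rec_pos (i j : Nat) (hj : 1 ≤ j) : bb (i + 1) j = bb i (j + 1) + bb i (j - 1) := by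
  by_cases hpar : (i + 1 + j) % 2 = 0
  · obtain ⟨k, hk⟩ : ∃ k, i + 1 + j = 2 * (k + 1) := ⟨(i + 1 + j) / 2 - 1, by omega⟩
    have h1 : (i + 1 + j) / 2 = k + 1 := by omega
    have h2 : (i + (j + 1)) % 2 = 0 := by omega
    have h3 : (i + (j + 1)) / 2 = k + 1 := by omega
    have h4 : (i + (j - 1)) % 2 = 0 := by omega
    have h5 : (i + (j - 1)) / 2 = k := by omega
    simp only [bb, hpar, h1, h2, h3, h4, h5, if_true]
    rw [Nat.choose_succ_succ i k, Nat.choose_succ_succ i (k + 1)]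
    push_cast
    ring
  · have h2 : ¬ (i + (j + 1)) % 2 = 0 := by omega
    have h4 : ¬ (i + (j - 1)) % 2 = 0 := by omega
    simp [bb, hpar, h2, h4]

lemma bb_rec_zero (i : Nat) : bb (i + 1) 0 = bb i 1 := by
  by_cases hpar : (i + 1) % 2 = 0
  · obtain ⟨k, hk⟩ : ∃ k, i + 1 = 2 * (k + 1) := ⟨(i + 1) / 2 - 1, by omega⟩
    have h2 : (i + 1 + 0) % 2 = 0 := by omega
    have h3 : (i + 1 + 0) / 2 = k + 1 := by omega
    have h4 : (i + 1) / 2 = k + 1 := by omega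
    have hsym : i.choose k = i.choose (k + 1) := by
      have h := Nat.choose_symm (n := i) (k := k + 1) (by omega)
      have he : i - (k + 1) = k := by omega
      rw [he] at h
      exact h
    simp only [bb, h2, h3]
    rw [Nat.choose_succ_succ i k, Nat.choose_succ_succ i (k + 1), hsym]
    push_cast
    ring
  · have h2 : ¬ (i + 1 + 0) % 2 = 0 := by omega
    simp [bb, h2]

lemma bb_big (i n : Nat) (hi : i ≤ n) : bb i (n + 1) = 0 := by
  by_cases hpar : (i + (n + 1)) % 2 = 0
  · have hlt : i < (i + (n + 1)) / 2 := by omega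
    have c1 : i.choose ((i + (n + 1)) / 2) = 0 := Nat.choose_eq_zero_of_lt hlt
    have c2 : i.choose ((i + (n + 1)) / 2 + 1) = 0 := Nat.choose_eq_zero_of_lt (by omega)
    simp [bb, hpar, c1, c2]
  · simp [bb, hpar]

lemma fA_eq_bb (n : Nat) : ∀ i, i ≤ n → ∀ j, j ≤ n → fA n i j = bb i j := by
  intro i
  induction i with
  | zero =>
    intro _ j hj
    match j with
    | 0 => simp [fA, bb]
    | jj + 1 =>
      have hfa : fA n 0 (jj + 1) = 0 := by simp [fA]
      rw [hfa]
      unfold bb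
      split_ifs with hp
      · rw [Nat.choose_eq_zero_of_lt (show 0 < (0 + (jj + 1)) / 2 by omega),
            Nat.choose_eq_zero_of_lt (show (0 : Nat) < (0 + (jj + 1)) / 2 + 1 by omega)]
        simp
      · rfl
  | succ i ih =>
    intro hi j hj
    have hi' : i ≤ n := by omega
    rcases Nat.eq_zero_or_pos j with rfl | hjpos
    · have h1 : 0 + 1 ≤ n := by omega
      have hstep : fA n (i + 1) 0 = fA n i 1 := by simp [fA, h1]
      rw [hstep, ih hi' 1 (by omega), ← bb_rec_zero]
    · have hj1 : 1 ≤ j := hjpos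
      by_cases hjn : j + 1 ≤ n
      · have hstep : fA n (i + 1) j = fA n i (j + 1) + fA n i (j - 1) := by simp [fA, hjn, hj1]
        rw [hstep, ih hi' (j + 1) hjn, ih hi' (j - 1) (by omega), ← bb_rec_pos i j hj1]
      · have hje : j = n := by omega
        have hstep : fA n (i + 1) j = fA n i (j - 1) := by simp [fA, hjn, hj1]
        rw [hstep, ih hi' (j - 1) (by omega), bb_rec_pos i j hj1,
            show j + 1 = n + 1 by omega, bb_big i n hi', zero_add]

-- the first Python loop: inserts at keys (0, x) miss / hit a queried key
lemma row0_fold_ne (l : List Int) (r : Std.HashMap (Int × Int) Int) (q : Int × Int) (d : Int)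
    (h : ∀ x ∈ l, q ≠ ((0 : Int), x)) :
    (l.foldl (fun r i => r.insert ((0 : Int), i) (0 : Int)) r).getD q d = r.getD q d := by
  induction l generalizing r with
  | nil => rfl
  | cons x xs ih =>
    simp only [List.foldl_cons]
    rw [ih _ (fun y hy => h y (List.mem_cons_of_mem _ hy)),
        hm_getD_insert, if_neg (h x (by simp))]

lemma row0_fold_mem (l : List Int) (r : Std.HashMap (Int × Int) Int) (q : Int × Int) (d : Int)
    (h : ∃ x ∈ l, q = ((0 : Int), x)) :
    (l.foldl (fun r i => r.insert ((0 : Int), i) (0 : Int)) r).getD q d = 0 := by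
  induction l generalizing r with
  | nil => exact absurd h (by simp)
  | cons x xs ih =>
    simp only [List.foldl_cons]
    by_cases hx : ∃ y ∈ xs, q = ((0 : Int), y)
    · exact ih _ hx
    · obtain ⟨y, hy, hqy⟩ := h
      rcases List.mem_cons.mp hy with rfl | hmem
      · rw [row0_fold_ne xs _ q d (fun z hz => fun hEq => hx ⟨z, hz, hEq⟩), hqy,
            hm_getD_insert, if_pos rfl]
      · exact absurd ⟨y, hmem, hqy⟩ hx

lemma stepA_get_ne (n i : Int) (r : Std.HashMap (Int × Int) Int) (j : Int)
    (q : Int × Int) (hq : q ≠ (i, j)) (d : Int) : (stepA n i r j).getD q d = r.getD q d := by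
  unfold stepA
  split_ifs <;> simp [hm_getD_insert, hq]

lemma rowFold_get_ne (n i : Int) (l : List Int) (r : Std.HashMap (Int × Int) Int)
    (q : Int × Int) (hq : ∀ j ∈ l, q ≠ (i, j)) (d : Int) :
    (l.foldl (stepA n i) r).getD q d = r.getD q d := by
  induction l generalizing r with
  | nil => rfl
  | cons x xs ih =>
    simp only [List.foldl_cons]
    rw [ih _ (fun y hy => hq y (List.mem_cons_of_mem _ hy)),
        stepA_get_ne _ _ _ _ _ (hq x (by simp)) _]

lemma stepA_get_self (n i : Int) (r : Std.HashMap (Int × Int) Int) (j : Int) :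
    (stepA n i r j).getD (i, j) 0 =
      (if j + 1 ≤ n then r.getD (i - 1, j + 1) 0 else 0) +
      (if j - 1 ≥ 0 then r.getD (i - 1, j - 1) 0 else 0) := by
  have h1 : ((i - 1, j + 1) : Int × Int) ≠ (i, j) := by
    intro h; rw [Prod.mk.injEq] at h; omega
  have h2 : ((i - 1, j - 1) : Int × Int) ≠ (i, j) := by
    intro h; rw [Prod.mk.injEq] at h; omega
  unfold stepA
  split_ifs <;> simp [hm_getD_insert, h1, h2]

-- the inner Python loop: computes row i from row i-1 (values p) at every column jj ≤ nn
lemma rowFold_get (nn : Nat) (i : Int) (r : Std.HashMap (Int × Int) Int) (p : Nat → Int)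
    (hp : ∀ jj : Nat, jj ≤ nn → r.getD (i - 1, (jj : Int)) 0 = p jj) (jj : Nat) (hj : jj ≤ nn) :
    ((PySem.List.pyRange 0 ((nn : Int) + 1) 1).foldl (stepA (nn : Int) i) r).getD (i, (jj : Int)) 0 =
      (if jj + 1 ≤ nn then p (jj + 1) else 0) + (if 1 ≤ jj then p (jj - 1) else 0) := by
  have hsplit : PySem.List.pyRange 0 ((nn : Int) + 1) 1
      = PySem.List.pyRange 0 ((jj : Int) + 1) 1 ++ PySem.List.pyRange ((jj : Int) + 1) ((nn : Int) + 1) 1 :=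
    PySem.List.pyRange_one_append _ _ _ (by omega) (by omega)
  have hlast : PySem.List.pyRange 0 ((jj : Int) + 1) 1
      = PySem.List.pyRange 0 (jj : Int) 1 ++ [(jj : Int)] :=
    PySem.List.pyRange_one_succ_right (by omega)
  have hmem : ∀ y ∈ PySem.List.pyRange ((jj : Int) + 1) ((nn : Int) + 1) 1,
      ((i, (jj : Int)) : Int × Int) ≠ (i, y) := by
    intro y hy hEq
    have hy' := PySem.List.mem_pyRange_one.mp hy
    rw [Prod.mk.injEq] at hEq
    omega
  rw [hsplit, List.foldl_append,
      rowFold_get_ne (nn : Int) i _ _ (i, (jj : Int)) hmem 0,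
      hlast, List.foldl_append]
  simp only [List.foldl_cons, List.foldl_nil]
  rw [stepA_get_self]
  have hrow : ∀ x : Int,
      ((PySem.List.pyRange 0 (jj : Int) 1).foldl (stepA (nn : Int) i) r).getD (i - 1, x) 0
        = r.getD (i - 1, x) 0 := by
    intro x
    refine rowFold_get_ne _ _ _ _ _ (fun y hy => ?_) _
    intro hEq; rw [Prod.mk.injEq] at hEq; omega
  rw [hrow ((jj : Int) + 1), hrow ((jj : Int) - 1)]
  by_cases hc1 : jj + 1 ≤ nn <;> by_cases hc2 : 1 ≤ jj
  · rw [if_pos (show (jj : Int) + 1 ≤ (nn : Int) by omega),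
        if_pos (show (jj : Int) - 1 ≥ 0 by omega), if_pos hc1, if_pos hc2,
        show (jj : Int) + 1 = ((jj + 1 : Nat) : Int) by omega,
        show (jj : Int) - 1 = ((jj - 1 : Nat) : Int) by omega,
        hp (jj + 1) hc1, hp (jj - 1) (by omega)]
  · rw [if_pos (show (jj : Int) + 1 ≤ (nn : Int) by omega),
        if_neg (show ¬ ((jj : Int) - 1 ≥ 0) by omega), if_pos hc1, if_neg hc2,
        show (jj : Int) + 1 = ((jj + 1 : Nat) : Int) by omega, hp (jj + 1) hc1]
  · rw [if_neg (show ¬ ((jj : Int) + 1 ≤ (nn : Int)) by omega),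
        if_pos (show (jj : Int) - 1 ≥ 0 by omega), if_neg hc1, if_pos hc2,
        show (jj : Int) - 1 = ((jj - 1 : Nat) : Int) by omega, hp (jj - 1) (by omega)]
  · rw [if_neg (show ¬ ((jj : Int) + 1 ≤ (nn : Int)) by omega),
        if_neg (show ¬ ((jj : Int) - 1 ≥ 0) by omega), if_neg hc1, if_neg hc2]

-- row 0 after the first loop
lemma row0_get (nn jj : Nat) (hj : jj ≤ nn) :
    ((PySem.List.pyRange 1 ((nn : Int) + 1) 1).foldl (fun r i => r.insert ((0 : Int), i) (0 : Int))
        ((∅ : Std.HashMap (Int × Int) Int).insert ((0 : Int), (0 : Int)) 1)).getD (0, (jj : Int)) 0 = fA nn 0 jj := by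
  rcases Nat.eq_zero_or_pos jj with rfl | hpos
  · rw [row0_fold_ne _ _ _ _ (fun x hx => ?_)]
    · simp [fA]
    · have hx' := PySem.List.mem_pyRange_one.mp hx
      intro hEq; rw [Prod.mk.injEq] at hEq; omega
  · rw [row0_fold_mem _ _ _ _ ⟨(jj : Int), PySem.List.mem_pyRange_one.mpr ⟨by omega, by omega⟩, rfl⟩]
    have hne : jj ≠ 0 := by omega
    simp [fA, hne]

-- the outer Python loop: after rows 1..m, row m holds fA nn m
lemma outer_get (nn : Nat) : ∀ m : Nat, m ≤ nn → ∀ jj : Nat, jj ≤ nn →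
    ((PySem.List.pyRange 1 ((m : Int) + 1) 1).foldl
        (fun r i => (PySem.List.pyRange 0 ((nn : Int) + 1) 1).foldl (stepA (nn : Int) i) r)
        ((PySem.List.pyRange 1 ((nn : Int) + 1) 1).foldl (fun r i => r.insert ((0 : Int), i) (0 : Int))
          ((∅ : Std.HashMap (Int × Int) Int).insert ((0 : Int), (0 : Int)) 1))).getD ((m : Int), (jj : Int)) 0
      = fA nn m jj := by
  intro m
  induction m with
  | zero =>
    intro _ jj hj
    simp only [Nat.cast_zero, zero_add]
    rw [PySem.List.pyRange_one_eq_nil (le_refl 1)]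
    simpa using row0_get nn jj hj
  | succ m ih =>
    intro hm jj hj
    have hm' : m ≤ nn := by omega
    rw [show ((m + 1 : Nat) : Int) = (m : Int) + 1 by push_cast; ring,
        PySem.List.pyRange_one_succ_right (a := 1) (b := (m : Int) + 1) (by omega), List.foldl_append]
    simp only [List.foldl_cons, List.foldl_nil]
    rw [rowFold_get nn ((m : Int) + 1) _ (fA nn m) ?_ jj hj]
    · simp [fA]
    · intro kk hkk
      rw [show (m : Int) + 1 - 1 = (m : Int) by ring]
      exact ih hm' kk hkk

lemma portA_eq_fA (m : Nat) : count_sequences_slow (m : Int) = fA m m 0 := by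
  have h := outer_get m m le_rfl 0 (Nat.zero_le m)
  simpa [count_sequences_slow] using h

-- B's multiplicative loop computes binomial coefficients
lemma loopB_choose (m q : Nat) (hq : q ≤ m) : ∀ t : Nat, t ≤ q →
    ((PySem.List.pyRange 0 (t : Int) 1).foldl
        (fun c k => PySem.Int.floordiv (c * ((m : Int) - k)) (k + 1)) 1) = (m.choose t : Int) := by
  intro t
  induction t with
  | zero =>
    intro _
    simp only [Nat.cast_zero]
    rw [PySem.List.pyRange_one_eq_nil (le_refl 0)]
    simp
  | succ t ih =>
    intro ht
    have ht' : t ≤ q := by omega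
    rw [show ((t + 1 : Nat) : Int) = (t : Int) + 1 by push_cast; ring,
        PySem.List.pyRange_one_succ_right (by omega), List.foldl_append]
    simp only [List.foldl_cons, List.foldl_nil]
    rw [ih ht']
    rw [show (m : Int) - (t : Int) = ((m - t : Nat) : Int) by omega,
        show ((t : Int) + 1) = ((t + 1 : Nat) : Int) by omega,
        show ((m.choose t : Int)) * ((m - t : Nat) : Int) = ((m.choose t * (m - t) : Nat) : Int) by push_cast; ring,
        PySem.Int.floordiv_natCast]
    have hnat : (m.choose t * (m - t)) / (t + 1) = m.choose (t + 1) := by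
      rw [← Nat.choose_succ_right_eq, Nat.mul_div_cancel _ (by omega)]
    rw [hnat]

lemma portB_eq_bb (m : Nat) : count_sequences_slow_alt (m : Int) = bb m 0 := by
  by_cases hodd : m % 2 = 1
  · have hmod : PySem.Int.mod (m : Int) 2 = 1 := by
      rw [show (2 : Int) = ((2 : Nat) : Int) from rfl, PySem.Int.mod_natCast, hodd]
      rfl
    unfold count_sequences_slow_alt
    rw [if_pos hmod]
    unfold bb
    rw [if_neg (show ¬ (m + 0) % 2 = 0 by omega)]
  · have he : m % 2 = 0 := by omega
    obtain ⟨q, rfl⟩ : ∃ q, m = 2 * q := ⟨m / 2, by omega⟩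
    have hmod : PySem.Int.mod ((2 * q : Nat) : Int) 2 = 0 := by
      rw [show (2 : Int) = ((2 : Nat) : Int) from rfl, PySem.Int.mod_natCast]
      simp [Nat.mul_mod_right]
    have hdiv : PySem.Int.floordiv ((2 * q : Nat) : Int) 2 = (q : Int) := by
      rw [show (2 : Int) = ((2 : Nat) : Int) from rfl, PySem.Int.floordiv_natCast]
      simp
    simp only [count_sequences_slow_alt, hmod, hdiv]
    rw [if_neg (by norm_num)]
    rw [loopB_choose (2 * q) q (by omega) q le_rfl]
    rw [show ((2 * q : Nat) : Int) - (q : Int) = ((q : Nat) : Int) by omega,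
        show ((q : Int) + 1) = ((q + 1 : Nat) : Int) by omega,
        show (((2 * q).choose q : Int)) * ((q : Nat) : Int) = (((2 * q).choose q * q : Nat) : Int) by push_cast; ring,
        PySem.Int.floordiv_natCast]
    have hnat : ((2 * q).choose q * q) / (q + 1) = (2 * q).choose (q + 1) := by
      have h := Nat.choose_succ_right_eq (2 * q) q
      rw [show 2 * q - q = q by omega] at h
      rw [← h, Nat.mul_div_cancel _ (by omega)]
    rw [hnat]
    simp [bb]

-- ===== VERDICT (by name: the statement is the Claim_ definition above) =====
theorem count_sequences_slow_spec : Claim_equal_count_sequences_slow := by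
  intro n _ hpre
  unfold Spec_count_sequences_slow
  obtain ⟨m, rfl⟩ := Int.eq_ofNat_of_zero_le hpre
  rw [portA_eq_fA, portB_eq_bb, fA_eq_bb m m le_rfl 0 (Nat.zero_le m)]
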